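-- pv_equiv track=rewrite | github.com/loserrain/UVa-1 | 706/lc.py | print_3
-- ===== SOURCE A (Python) =====
-- def init_grid(s):
--     grid = []
--     for i in range(2*s + 3):
--         grid.append([' '] * (s+2))
--
--     return grid
--
-- def print_3(s):
--     grid = init_grid(s)
--     for i in [0, s+1, -1]:
--         for j in range(1, s+1):
--             grid[i][j] = '-'
--
--     for i in range(1, s+1):
--         grid[i][-1] = '|'
--
--     for i in range(s+2, 2*s + 2):
--         grid[i][-1] = '|'
--
--     return grid
-- ===== SOURCE B (Python) =====
-- def print_3(s):
--     grid = []
--     for i in range(2*s + 3):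
--         row = [' '] * (s + 2)
--         if i == 0 or i == s + 1 or i == 2*s + 2:
--             for j in range(1, s + 1):
--                 row[j] = '-'
--         elif 1 <= i <= s or s + 2 <= i <= 2*s + 1:
--             row[-1] = '|'
--         grid.append(row)
--     return grid
-- ===== Notes on version B (the rewrite author's own statement) =====
-- stated objective: simpler
-- what changed: Single pass over rows: each row is built completely by classifying its index (top/middle/bottom dash row, right-bar row, or blank) and appended once, instead of allocating a blank grid and then painting three separate segment loops into it.
import Mathlib
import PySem

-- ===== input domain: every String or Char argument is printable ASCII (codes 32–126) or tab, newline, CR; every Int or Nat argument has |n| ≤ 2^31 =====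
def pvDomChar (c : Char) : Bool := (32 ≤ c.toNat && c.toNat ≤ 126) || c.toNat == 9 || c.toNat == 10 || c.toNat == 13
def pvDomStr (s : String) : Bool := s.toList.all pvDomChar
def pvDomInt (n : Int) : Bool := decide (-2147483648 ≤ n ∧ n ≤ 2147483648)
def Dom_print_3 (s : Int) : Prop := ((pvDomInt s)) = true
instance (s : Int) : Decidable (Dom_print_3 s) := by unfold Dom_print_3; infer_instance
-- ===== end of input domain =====

-- B builds each row once by classifying its index in a single pass, instead of A's blank grid painted by three segment loops; objective: simpler.

-- ===== PORT A =====
def init_grid (s : Int) : List (List String) :=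
  (PySem.List.pyRange 0 (2*s + 3) 1).foldl
    (fun g _ => g ++ [List.replicate (s + 2).toNat " "]) []

-- grid[i][j] = v  (every index A uses is in range whenever the surrounding loop runs, so total pyGetD/pySetD are exact here)
def pvSetCell (g : List (List String)) (i j : Int) (v : String) : List (List String) :=
  PySem.List.pySetD g i (PySem.List.pySetD (PySem.List.pyGetD g i []) j v)

def print_3 (s : Int) : List (List String) :=
  let grid := init_grid s
  let grid := [0, s + 1, -1].foldl (fun g i =>
      (PySem.List.pyRange 1 (s + 1) 1).foldl (fun g j => pvSetCell g i j "-") g) grid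
  let grid := (PySem.List.pyRange 1 (s + 1) 1).foldl (fun g i => pvSetCell g i (-1) "|") grid
  let grid := (PySem.List.pyRange (s + 2) (2*s + 2) 1).foldl (fun g i => pvSetCell g i (-1) "|") grid
  grid

-- ===== PORT B =====
def print_3_alt (s : Int) : List (List String) :=
  (PySem.List.pyRange 0 (2*s + 3) 1).foldl (fun g i =>
    let row := List.replicate (s + 2).toNat " "
    let row :=
      if i = 0 ∨ i = s + 1 ∨ i = 2*s + 2 then
        (PySem.List.pyRange 1 (s + 1) 1).foldl (fun r j => PySem.List.pySetD r j "-") row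
      else if (1 ≤ i ∧ i ≤ s) ∨ (s + 2 ≤ i ∧ i ≤ 2*s + 1) then
        PySem.List.pySetD row (-1) "|"
      else row
    g ++ [row]) []

-- ===== PRECONDITION & SPEC =====
def Spec_print_3 (s : Int) (out : List (List String)) : Prop := out = print_3_alt s
instance (s : Int) (out : List (List String)) : Decidable (Spec_print_3 s out) := by unfold Spec_print_3; infer_instance

-- ===== CLAIM (what is proved, stated in full; the proofs are below) =====
def Claim_equal_print_3 : Prop := ∀ (s : Int), Dom_print_3 s → Spec_print_3 s (print_3 s)

-- ===== LEMMAS AND PROOFS =====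

-- row shapes
def pvBlank (n : Nat) : List String := List.replicate (n + 2) " "
def pvDash (n : Nat) : List String := " " :: (List.replicate n "-" ++ [" "])
def pvBar (n : Nat) : List String := List.replicate (n + 1) " " ++ ["|"]

theorem pvSetD_neg_one {α : Type} (xs : List α) (h : xs ≠ []) (v : α) :
    PySem.List.pySetD xs (-1) v = xs.set (xs.length - 1) v := by
  have hl : 0 < xs.length := List.length_pos_iff.mpr h
  simp [PySem.List.pySetD, PySem.List.pySet?, PySem.List.pyIdx?]
  rw [if_pos (by omega : 1 ≤ xs.length)]; rfl

theorem pvDashFoldAux (n : Nat) : ∀ (m : Nat), m ≤ n →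
    (PySem.List.pyRange 1 ((m : Int) + 1) 1).foldl (fun r j => PySem.List.pySetD r j "-") (pvBlank n)
      = " " :: (List.replicate m "-" ++ List.replicate (n - m) " ") ++ [" "] := by
  intro m
  induction m with
  | zero =>
    intro _
    simp [PySem.List.pyRange_one_eq_nil, pvBlank]
    rw [show n + 2 = (n+1)+1 from rfl, List.replicate_succ, List.replicate_succ' (n := n)]
  | succ m ih =>
    intro hm
    have h1 : ((m+1 : Nat) : Int) + 1 = ((m : Int) + 1) + 1 := by push_cast; ring
    rw [h1, PySem.List.pyRange_one_succ_right (by omega), List.foldl_append, ih (by omega)]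
    simp only [List.foldl_cons, List.foldl_nil]
    rw [PySem.List.pySetD_of_nonneg _ _ (by omega)]
    have h2 : ((m:Int)+1).toNat = m + 1 := by omega
    have h3 : n - m = (n - (m+1)) + 1 := by omega
    rw [h2, h3, List.replicate_succ]
    simp only [List.cons_append, List.set_cons_succ, List.append_assoc, List.set_append,
      List.length_replicate, lt_irrefl, if_false, Nat.sub_self, List.cons_append]
    simp [List.replicate_succ' (n := m)]

theorem pvDashFold (n : Nat) :
    (PySem.List.pyRange 1 ((n : Int) + 1) 1).foldl (fun r j => PySem.List.pySetD r j "-") (pvBlank n)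
      = pvDash n := by
  rw [pvDashFoldAux n n le_rfl]; simp [pvDash]

theorem pvBarOfBlank (n : Nat) :
    PySem.List.pySetD (pvBlank n) (-1) "|" = pvBar n := by
  rw [pvSetD_neg_one _ (by simp [pvBlank])]
  simp [pvBlank, pvBar]
  rw [show n + 2 = (n+1) + 1 from rfl, List.replicate_succ' (n := n+1)]
  rw [List.set_append]
  simp

theorem pvSetCell_nat (g : List (List String)) (i : Nat) (j : Int) (v : String) :
    pvSetCell g (i : Int) j v = g.set i (PySem.List.pySetD (g.getD i []) j v) := by
  unfold pvSetCell
  rw [PySem.List.pySetD_of_nonneg _ _ (by positivity), PySem.List.pyGetD_natCast]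
  simp

theorem pvSetCell_neg_one (g : List (List String)) (h : g ≠ []) (j : Int) (v : String) :
    pvSetCell g (-1) j v = g.set (g.length - 1) (PySem.List.pySetD (g.getD (g.length - 1) []) j v) := by
  unfold pvSetCell
  rw [pvSetD_neg_one _ h, PySem.List.pyGetD_neg_one _ _ h]
  congr 2
  rw [List.getLast_eq_getElem, List.getD_eq_getElem _ _ (by have := List.length_pos_iff.mpr h; omega)]

theorem pvFoldSetCell_nat (l : List Int) (i : Nat) (v : String) : ∀ (g : List (List String)), i < g.length →
    l.foldl (fun g j => pvSetCell g (i : Int) j v) g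
      = g.set i (l.foldl (fun r j => PySem.List.pySetD r j v) (g.getD i [])) := by
  induction l with
  | nil =>
    intro g hi
    simp only [List.foldl_nil]
    rw [List.getD_eq_getElem?_getD, List.getElem?_eq_getElem hi]; simp
  | cons j l ih =>
    intro g hi
    simp only [List.foldl_cons]
    rw [pvSetCell_nat, ih _ (by simp [hi]), List.set_set]
    congr 1
    rw [List.getD_eq_getElem _ _ (by simp [hi]), List.getElem_set_self, List.getD_eq_getElem _ _ hi]

theorem pvFoldSetCell_neg (l : List Int) (v : String) : ∀ (g : List (List String)), g ≠ [] →
    l.foldl (fun g j => pvSetCell g (-1) j v) g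
      = g.set (g.length - 1) (l.foldl (fun r j => PySem.List.pySetD r j v) (g.getD (g.length - 1) [])) := by
  induction l with
  | nil =>
    intro g h
    have hl : 0 < g.length := List.length_pos_iff.mpr h
    simp only [List.foldl_nil]
    rw [List.getD_eq_getElem?_getD, List.getElem?_eq_getElem (by omega)]
    simp
  | cons j l ih =>
    intro g h
    have hl : 0 < g.length := List.length_pos_iff.mpr h
    simp only [List.foldl_cons]
    rw [pvSetCell_neg_one _ h, ih _ (by simp <;> omega), List.length_set, List.set_set]
    congr 1
    rw [List.getD_eq_getElem _ _ (by simp <;> omega), List.getElem_set_self,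
        List.getD_eq_getElem _ _ (by omega)]

-- effect of the bar-painting loop, index by index
theorem pvBarFold (fuel : Nat) : ∀ (a b : Int) (g : List (List String)), (b - a).toNat = fuel → 0 ≤ a → b ≤ (g.length : Int) →
    ((PySem.List.pyRange a b 1).foldl (fun g i => pvSetCell g i (-1) "|") g).length = g.length ∧
    ∀ (k : Nat), k < g.length →
      ((PySem.List.pyRange a b 1).foldl (fun g i => pvSetCell g i (-1) "|") g)[k]?
        = if a ≤ (k : Int) ∧ (k : Int) < b then some (PySem.List.pySetD (g.getD k []) (-1) "|") else g[k]? := by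
  induction fuel with
  | zero =>
    intro a b g hf ha hb
    rw [PySem.List.pyRange_one_eq_nil (by omega)]
    simp only [List.foldl_nil]
    refine ⟨trivial, fun k hk => ?_⟩
    rw [if_neg (by omega)]
  | succ fuel ih =>
    intro a b g hf ha hb
    have hab : a < b := by omega
    rw [PySem.List.pyRange_one_cons hab]
    simp only [List.foldl_cons]
    have hA := pvSetCell_nat g a.toNat (-1) "|"
    rw [Int.toNat_of_nonneg ha] at hA
    rw [hA]
    set G := g.set a.toNat (PySem.List.pySetD (g.getD a.toNat []) (-1) "|") with hG
    have hlen : G.length = g.length := by rw [hG]; simp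
    obtain ⟨ihlen, ihget⟩ := ih (a+1) b G (by omega) (by omega) (by omega)
    refine ⟨by omega, fun k hk => ?_⟩
    rw [ihget k (by omega)]
    by_cases hk1 : (a+1) ≤ (k:Int) ∧ (k:Int) < b
    · rw [if_pos hk1, if_pos (by omega : a ≤ (k:Int) ∧ (k:Int) < b)]
      have hrow : G.getD k [] = g.getD k [] := by
        rw [hG, List.getD_eq_getElem?_getD, List.getElem?_set_ne (by omega), ← List.getD_eq_getElem?_getD]
      rw [hrow]
    · rw [if_neg hk1]
      by_cases hk2 : a ≤ (k:Int) ∧ (k:Int) < b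
      · have hka : k = a.toNat := by omega
        rw [if_pos hk2, hG, hka, List.getElem?_set_self (by omega)]
      · rw [if_neg hk2, hG, List.getElem?_set_ne (by omega)]

theorem pvInit (n : Nat) : init_grid (n : Int) = List.replicate (2*n + 3) (pvBlank n) := by
  unfold init_grid
  rw [PySem.List.foldl_append_singleton_eq_map]
  rw [show (2*(n:Int)+3) = ((2*n+3 : Nat) : Int) by push_cast; ring, PySem.List.pyRange_zero_natCast,
      List.map_map]
  refine List.eq_replicate_iff.mpr ⟨by simp, ?_⟩
  intro b hb
  rw [List.nil_append, List.mem_map] at hb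
  obtain ⟨_, _, hb⟩ := hb
  rw [← hb, show ((n:Int)+2).toNat = n+2 by omega]; rfl

theorem pvA_char (n : Nat) : print_3 (n : Int) = (List.range (2*n + 3)).map (fun k =>
    if k = 0 ∨ k = n + 1 ∨ k = 2*n + 2 then pvDash n else pvBar n) := by
  have hN : 0 < 2*n + 3 := by omega
  show (PySem.List.pyRange ((n:Int) + 2) (2*(n:Int) + 2) 1).foldl (fun g i => pvSetCell g i (-1) "|")
      ((PySem.List.pyRange 1 ((n:Int) + 1) 1).foldl (fun g i => pvSetCell g i (-1) "|")
        ([0, (n:Int) + 1, -1].foldl (fun g i =>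
            (PySem.List.pyRange 1 ((n:Int) + 1) 1).foldl (fun g j => pvSetCell g i j "-") g)
          (init_grid (n:Int)))) = _
  rw [pvInit]
  simp only [List.foldl_cons, List.foldl_nil]
  -- dash row 0
  have s1 := pvFoldSetCell_nat (PySem.List.pyRange 1 ((n:Int) + 1) 1) 0 "-"
      (List.replicate (2*n+3) (pvBlank n)) (by simp <;> omega)
  simp only [Nat.cast_zero] at s1
  rw [s1, List.getD_eq_getElem _ _ (by simp <;> omega), List.getElem_replicate, pvDashFold]
  set g0 := List.replicate (2*n+3) (pvBlank n) with hg0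
  -- dash row n+1
  have s2 := pvFoldSetCell_nat (PySem.List.pyRange 1 ((n:Int) + 1) 1) (n+1) "-"
      (g0.set 0 (pvDash n)) (by simp [hg0] <;> omega)
  have c2 : ((n+1 : Nat) : Int) = (n:Int) + 1 := by push_cast; ring
  rw [c2] at s2
  rw [s2, List.getD_eq_getElem _ _ (by simp [hg0] <;> omega), List.getElem_set_ne (by omega),
      List.getElem_replicate, pvDashFold]
  -- dash row -1
  have hne : ((g0.set 0 (pvDash n)).set (n+1) (pvDash n)) ≠ [] := by
    apply List.ne_nil_of_length_pos; simp [hg0] <;> omega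
  have hlen1 : ((g0.set 0 (pvDash n)).set (n+1) (pvDash n)).length = 2*n+3 := by simp [hg0]
  rw [pvFoldSetCell_neg _ _ _ hne, hlen1]
  have h22 : 2*n+3-1 = 2*n+2 := by omega
  rw [h22, List.getD_eq_getElem _ _ (by simp [hg0] <;> omega), List.getElem_set_ne (by omega),
      List.getElem_set_ne (by omega), List.getElem_replicate, pvDashFold]
  set g1 := ((g0.set 0 (pvDash n)).set (n+1) (pvDash n)).set (2*n+2) (pvDash n) with hg1
  have hlg1 : g1.length = 2*n+3 := by simp [hg1, hg0]
  -- bar loop 1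
  obtain ⟨l2, c2'⟩ := pvBarFold (((n:Int)+1-1).toNat) 1 ((n:Int)+1) g1 rfl (by omega) (by rw [hlg1]; push_cast; omega)
  set g2 := (PySem.List.pyRange 1 ((n:Int) + 1) 1).foldl (fun g i => pvSetCell g i (-1) "|") g1 with hg2
  -- bar loop 2
  obtain ⟨l3, c3'⟩ := pvBarFold ((2*(n:Int)+2-((n:Int)+2)).toNat) ((n:Int)+2) (2*(n:Int)+2) g2 rfl (by omega)
      (by rw [l2, hlg1]; push_cast; omega)
  -- elementwise
  apply List.ext_getElem?
  intro k
  by_cases hk : k < 2*n+3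
  · have hg1k : g1[k]? = some (if k = 0 ∨ k = n + 1 ∨ k = 2*n + 2 then pvDash n else pvBlank n) := by
      rw [hg1]
      by_cases h0 : k = 0
      · subst h0
        rw [List.getElem?_set_ne (by omega), List.getElem?_set_ne (by omega),
            List.getElem?_set_self (by simp [hg0] <;> omega)]
        simp
      · by_cases h1 : k = n+1
        · subst h1
          rw [List.getElem?_set_ne (by omega), List.getElem?_set_self (by simp [hg0] <;> omega)]
          simp
        · by_cases h2 : k = 2*n+2
          · subst h2
            rw [List.getElem?_set_self (by simp [hg0] <;> omega)]
            simp
          · rw [List.getElem?_set_ne (by omega), List.getElem?_set_ne (by omega),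
                List.getElem?_set_ne (by omega), hg0, List.getElem?_eq_getElem (by simp <;> omega),
                List.getElem_replicate]
            simp [h0, h1, h2]
    have hg2k : g2[k]? = some (if k = 0 ∨ k = n + 1 ∨ k = 2*n + 2 then pvDash n
        else if 1 ≤ k ∧ k < n+1 then pvBar n else pvBlank n) := by
      rw [c2' k (by omega)]
      by_cases hr : (1:Int) ≤ (k:Int) ∧ (k:Int) < (n:Int)+1
      · rw [if_pos hr]
        have : g1.getD k [] = pvBlank n := by
          rw [List.getD_eq_getElem?_getD, hg1k, if_neg (by omega)]; rfl
        rw [this, pvBarOfBlank, if_neg (by omega), if_pos (by omega)]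
      · rw [if_neg hr, hg1k]
        by_cases hd : k = 0 ∨ k = n + 1 ∨ k = 2*n + 2
        · simp [hd]
        · rw [if_neg hd, if_neg hd, if_neg (by omega)]
    rw [c3' k (by rw [l2, hlg1]; omega)]
    have hrhs : ((List.range (2*n + 3)).map (fun k =>
        if k = 0 ∨ k = n + 1 ∨ k = 2*n + 2 then pvDash n else pvBar n))[k]?
        = some (if k = 0 ∨ k = n + 1 ∨ k = 2*n + 2 then pvDash n else pvBar n) := by
      rw [List.getElem?_map, List.getElem?_range hk]; rfl
    rw [hrhs]
    by_cases hr3 : ((n:Int)+2) ≤ (k:Int) ∧ (k:Int) < 2*(n:Int)+2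
    · rw [if_pos hr3]
      have : g2.getD k [] = pvBlank n := by
        rw [List.getD_eq_getElem?_getD, hg2k, if_neg (by omega), if_neg (by omega)]; rfl
      rw [this, pvBarOfBlank, if_neg (by omega)]
    · rw [if_neg hr3, hg2k]
      by_cases hd : k = 0 ∨ k = n + 1 ∨ k = 2*n + 2
      · simp [hd]
      · rw [if_neg hd, if_pos (by omega), if_neg hd]
  · rw [List.getElem?_eq_none (by rw [l3, l2, hlg1]; omega),
        List.getElem?_eq_none (by simp <;> omega)]

theorem pvB_char (n : Nat) : print_3_alt (n : Int) = (List.range (2*n + 3)).map (fun k =>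
    if k = 0 ∨ k = n + 1 ∨ k = 2*n + 2 then pvDash n else pvBar n) := by
  show (PySem.List.pyRange 0 (2*(n:Int) + 3) 1).foldl (fun g i => g ++
      [if i = 0 ∨ i = (n:Int) + 1 ∨ i = 2*(n:Int) + 2 then
          (PySem.List.pyRange 1 ((n:Int) + 1) 1).foldl (fun r j => PySem.List.pySetD r j "-")
            (List.replicate ((n:Int) + 2).toNat " ")
        else if (1 ≤ i ∧ i ≤ (n:Int)) ∨ ((n:Int) + 2 ≤ i ∧ i ≤ 2*(n:Int) + 1) then
          PySem.List.pySetD (List.replicate ((n:Int) + 2).toNat " ") (-1) "|"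
        else List.replicate ((n:Int) + 2).toNat " "]) [] = _
  rw [PySem.List.foldl_append_singleton_eq_map]
  rw [show (2*(n:Int)+3) = ((2*n+3 : Nat) : Int) by push_cast; ring, PySem.List.pyRange_zero_natCast,
      List.map_map, List.nil_append]
  apply List.map_congr_left
  intro k hk
  have hk' : k < 2*n+3 := List.mem_range.mp hk
  simp only [Function.comp]
  rw [show ((n:Int) + 2).toNat = n + 2 by omega,
      show (List.replicate (n+2) " ") = pvBlank n from rfl]
  by_cases hc : k = 0 ∨ k = n + 1 ∨ k = 2*n + 2
  · rw [if_pos (by omega : (k:Int) = 0 ∨ (k:Int) = (n:Int) + 1 ∨ (k:Int) = 2*(n:Int) + 2),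
        if_pos hc, pvDashFold]
  · rw [if_neg (by omega), if_pos (by omega), if_neg hc, pvBarOfBlank]

theorem pvNegBig (s : Int) (h : s ≤ -2) : print_3 s = [] ∧ print_3_alt s = [] := by
  have r1 : PySem.List.pyRange 0 (2*s+3) 1 = [] := PySem.List.pyRange_one_eq_nil (by omega)
  have r2 : PySem.List.pyRange 1 (s+1) 1 = [] := PySem.List.pyRange_one_eq_nil (by omega)
  have r3 : PySem.List.pyRange (s+2) (2*s+2) 1 = [] := PySem.List.pyRange_one_eq_nil (by omega)
  constructor
  · show (PySem.List.pyRange (s+2) (2*s+2) 1).foldl _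
      ((PySem.List.pyRange 1 (s+1) 1).foldl _
        ([0, s+1, -1].foldl _ (init_grid s))) = []
    rw [r2, r3]
    simp only [List.foldl_nil]
    unfold init_grid
    rw [r1]
    simp
  · unfold print_3_alt
    rw [r1]
    rfl

-- ===== VERDICT (by name: the statement is the Claim_ definition above) =====
theorem print_3_spec : Claim_equal_print_3 := by
  intro s _
  unfold Spec_print_3
  rcases lt_or_ge s (-1) with h | h
  · have := pvNegBig s (by omega); rw [this.1, this.2]
  · rcases eq_or_lt_of_le h with h1 | h1
    · subst_vars; decide
    · have hn : s = ((s.toNat : Nat) : Int) := by omega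
      rw [hn, pvA_char, pvB_char]
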